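-- pv_equiv track=rewrite | github.com/michaelcukier/Poker-Hand-Tracker | db_api/plots/dump.py | create_freq_matrix
-- ===== SOURCE A (Python) =====
-- def create_freq_matrix(freq: dict) -> list:
--     # creates a 13*13 matrix with each value set to the frequencies
--     matrix = [[0 for i in range(13)] for j in range(13)]
--
--     myMat = [
--     ['AA', 'AKs', 'AQs', 'AJs', 'ATs', 'A9s', 'A8s', 'A7s', 'A6s', 'A5s', 'A4s', 'A3s', 'A2s'],
--     ['KAo', 'KK', 'KQs', 'KJs', 'KTs', 'K9s', 'K8s', 'K7s', 'K6s', 'K5s', 'K4s', 'K3s', 'K2s'],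
--     ['QAo', 'QKo', 'QQ', 'QJs', 'QTs', 'Q9s', 'Q8s', 'Q7s', 'Q6s', 'Q5s', 'Q4s', 'Q3s', 'Q2s'],
--     ['JAo', 'JKo', 'JQo', 'JJ', 'JTs', 'J9s', 'J8s', 'J7s', 'J6s', 'J5s', 'J4s', 'J3s', 'J2s'],
--     ['TAo', 'TKo', 'TQo', 'TJo', 'TT', 'T9s', 'T8s', 'T7s', 'T6s', 'T5s', 'T4s', 'T3s', 'T2s'],
--     ['9Ao', '9Ko', '9Qo', '9Jo', '9To', '99', '98s', '97s', '96s', '95s', '94s', '93s', '92s'],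
--     ['8Ao', '8Ko', '8Qo', '8Jo', '8To', '89o', '88', '87s', '86s', '85s', '84s', '83s', '82s'],
--     ['7Ao', '7Ko', '7Qo', '7Jo', '7To', '79o', '78o', '77', '76s', '75s', '74s', '73s', '72s'],
--     ['6Ao', '6Ko', '6Qo', '6Jo', '6To', '69o', '68o', '67o', '66', '65s', '64s', '63s', '62s'],
--     ['5Ao', '5Ko', '5Qo', '5Jo', '5To', '59o', '58o', '57o', '56o', '55', '54s', '53s', '52s'],
--     ['4Ao', '4Ko', '4Qo', '4Jo', '4To', '49o', '48o', '47o', '46o', '45o', '44', '43s', '42s'],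
--     ['3Ao', '3Ko', '3Qo', '3Jo', '3To', '39o', '38o', '37o', '36o', '35o', '34o', '33', '32s'],
--     ['2Ao', '2Ko', '2Qo', '2Jo', '2To', '29o', '28o', '27o', '26o', '25o', '24o', '23o', '22']]
--
--
--     for i in freq:
--         for m in range(13):
--             b = 0
--             for n in range(13):
--                 if myMat[m][n] == i:
--                     matrix[m][n] = freq[i]
--                     b = 1
--                     break
--             if b:
--                 break
--
--     return matrix
-- ===== SOURCE B (Python) =====
-- def create_freq_matrix(freq: dict) -> list:
--     # B: no lookup table -- each cell's hand label is computed from the rank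
--     # string ("AKQJT98765432"): diagonal = pair, above the diagonal = suited,
--     # below = offsuit.  One pass over the grid with a dict lookup per cell.
--     ranks = "AKQJT98765432"
--
--     def hand(m, n):
--         if m == n:
--             return ranks[m] * 2
--         if m < n:
--             return ranks[m] + ranks[n] + 's'
--         return ranks[m] + ranks[n] + 'o'
--
--     return [[freq.get(hand(m, n), 0) for n in range(13)] for m in range(13)]
-- ===== Notes on version B (the rewrite author's own statement) =====
-- stated objective: faster
-- what changed: B drops the 13x13 lookup table entirely: it synthesizes each cell's hand label arithmetically from the rank string (pair on the diagonal, suited above, offsuit below) and fills the grid in one pass with a dict lookup per cell, instead of A's per-key rescans of the table with a sentinel flag and double break.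
import Mathlib
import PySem

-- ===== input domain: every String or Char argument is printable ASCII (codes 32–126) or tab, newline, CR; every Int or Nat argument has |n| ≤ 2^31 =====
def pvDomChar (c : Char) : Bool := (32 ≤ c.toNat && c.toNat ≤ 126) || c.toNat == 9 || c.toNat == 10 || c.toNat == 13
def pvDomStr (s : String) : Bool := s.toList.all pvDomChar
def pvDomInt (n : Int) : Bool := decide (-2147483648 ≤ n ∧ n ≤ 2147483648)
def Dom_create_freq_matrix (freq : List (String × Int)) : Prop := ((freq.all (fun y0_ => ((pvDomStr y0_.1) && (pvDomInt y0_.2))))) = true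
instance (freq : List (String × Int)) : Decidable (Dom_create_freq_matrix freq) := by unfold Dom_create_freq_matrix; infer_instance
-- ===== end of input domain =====

-- B replaces A's per-key rescans of the fixed 13x13 label table (sentinel flag, double
-- break) by computing each cell's label from the rank string and reading the dict once per cell.

-- ===== PORT A =====
-- A's fixed 13x13 grid of hand labels
def pvMyMat : List (List String) := [
  ["AA", "AKs", "AQs", "AJs", "ATs", "A9s", "A8s", "A7s", "A6s", "A5s", "A4s", "A3s", "A2s"],
  ["KAo", "KK", "KQs", "KJs", "KTs", "K9s", "K8s", "K7s", "K6s", "K5s", "K4s", "K3s", "K2s"],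
  ["QAo", "QKo", "QQ", "QJs", "QTs", "Q9s", "Q8s", "Q7s", "Q6s", "Q5s", "Q4s", "Q3s", "Q2s"],
  ["JAo", "JKo", "JQo", "JJ", "JTs", "J9s", "J8s", "J7s", "J6s", "J5s", "J4s", "J3s", "J2s"],
  ["TAo", "TKo", "TQo", "TJo", "TT", "T9s", "T8s", "T7s", "T6s", "T5s", "T4s", "T3s", "T2s"],
  ["9Ao", "9Ko", "9Qo", "9Jo", "9To", "99", "98s", "97s", "96s", "95s", "94s", "93s", "92s"],
  ["8Ao", "8Ko", "8Qo", "8Jo", "8To", "89o", "88", "87s", "86s", "85s", "84s", "83s", "82s"],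
  ["7Ao", "7Ko", "7Qo", "7Jo", "7To", "79o", "78o", "77", "76s", "75s", "74s", "73s", "72s"],
  ["6Ao", "6Ko", "6Qo", "6Jo", "6To", "69o", "68o", "67o", "66", "65s", "64s", "63s", "62s"],
  ["5Ao", "5Ko", "5Qo", "5Jo", "5To", "59o", "58o", "57o", "56o", "55", "54s", "53s", "52s"],
  ["4Ao", "4Ko", "4Qo", "4Jo", "4To", "49o", "48o", "47o", "46o", "45o", "44", "43s", "42s"],
  ["3Ao", "3Ko", "3Qo", "3Jo", "3To", "39o", "38o", "37o", "36o", "35o", "34o", "33", "32s"],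
  ["2Ao", "2Ko", "2Qo", "2Jo", "2To", "29o", "28o", "27o", "26o", "25o", "24o", "23o", "22"]]

-- inner n-loop: scan the row of labels, on the first match set the cell and break (Bool = the flag b)
def pvRowLoop (k : String) (v : Int) : List String → List Int → (List Int × Bool)
  | s :: ss, x :: xs =>
      if s == k then (v :: xs, true)
      else
        let r := pvRowLoop k v ss xs
        (x :: r.1, r.2)
  | _, xs => (xs, false)

-- outer m-loop: run the inner loop on each row; if the flag was set, break
def pvMatLoop (k : String) (v : Int) : List (List String) → List (List Int) → List (List Int)
  | srow :: srest, row :: rest =>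
      let r := pvRowLoop k v srow row
      if r.2 then r.1 :: rest else r.1 :: pvMatLoop k v srest rest
  | _, mat => mat

def create_freq_matrix (freq : List (String × Int)) : List (List Int) :=
  let matrix := List.replicate 13 (List.replicate 13 (0 : Int))
  let d := PySem.Dict.ofList freq   -- the Python argument is a dict
  -- for i in freq: search myMat for i, set matrix[m][n] = freq[i], break out of both loops
  d.items.foldl (fun mat kv => pvMatLoop kv.1 (d.getD kv.1 0) pvMyMat mat) matrix

-- ===== PORT B =====
-- ranks = "AKQJT98765432", as its character list
def pvRanks : List Char := "AKQJT98765432".toList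

-- hand(m, n) of Source B; ranks[m] is only indexed with m, n < 13, where getD is exact Python indexing
def pvHand (m n : Nat) : String :=
  let rm := pvRanks.getD m ' '
  let rn := pvRanks.getD n ' '
  if m == n then String.mk [rm, rm]
  else if m < n then String.mk [rm, rn, 's']
  else String.mk [rm, rn, 'o']

def create_freq_matrix_alt (freq : List (String × Int)) : List (List Int) :=
  let d := PySem.Dict.ofList freq
  (List.range 13).map (fun m => (List.range 13).map (fun n => d.getD (pvHand m n) 0))

-- ===== PRECONDITION & SPEC =====
def Spec_create_freq_matrix (freq : List (String × Int)) (out : List (List Int)) : Prop := out = create_freq_matrix_alt freq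
instance (freq : List (String × Int)) (out : List (List Int)) : Decidable (Spec_create_freq_matrix freq out) := by unfold Spec_create_freq_matrix; infer_instance

-- ===== CLAIM (what is proved, stated in full; the proofs are below) =====
def Claim_equal_create_freq_matrix : Prop := ∀ (freq : List (String × Int)), Dom_create_freq_matrix freq → Spec_create_freq_matrix freq (create_freq_matrix freq)

-- ===== LEMMAS AND PROOFS =====

lemma pvRowLoop_map (k : String) (v : Int) (row : List String) (g : String → Int)
    (h : row.count k ≤ 1) :
    pvRowLoop k v row (row.map g)
      = (row.map (fun s => if s == k then v else g s), row.contains k) := by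
  induction row with
  | nil => simp [pvRowLoop]
  | cons s ss ih =>
      by_cases hs : (s == k) = true
      · have hk : s = k := eq_of_beq hs
        have hnot : k ∉ ss := by
          intro hmem
          have h1 := List.count_pos_iff.mpr hmem
          simp [hk] at h
          omega
        simp [pvRowLoop, hk]
        exact fun a ha hak => absurd (hak ▸ ha) hnot
      · have hs' : (s == k) = false := by simpa using hs
        have h' : ss.count k ≤ 1 := by
          simp [List.count_cons] at h
          omega
        simp [pvRowLoop, hs', ih h']
        exact ⟨fun h2 => absurd (by simp [h2]) hs, fun h2 => absurd (by simp [h2.symm]) hs⟩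

lemma pvMatLoop_map (k : String) (v : Int) (G : List (List String)) (g : String → Int)
    (h : G.flatten.count k ≤ 1) :
    pvMatLoop k v G (G.map (fun r => r.map g))
      = G.map (fun r => r.map (fun s => if s == k then v else g s)) := by
  induction G with
  | nil => simp [pvMatLoop]
  | cons row rest ih =>
      have hcnt : row.count k + rest.flatten.count k ≤ 1 := by
        simpa [List.count_append] using h
      have hrow : row.count k ≤ 1 := by omega
      simp only [List.map_cons, pvMatLoop, pvRowLoop_map k v row g hrow]
      by_cases hb : row.contains k
      · have hmem : k ∈ row := by simpa using hb
        have : 1 ≤ row.count k := List.count_pos_iff.mpr hmem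
        have hrest : k ∉ rest.flatten := by
          intro hmem'
          have := List.count_pos_iff.mpr hmem'
          omega
        simp only [hb, if_pos]
        congr 1
        exact (List.map_congr_left (fun r hr => (List.map_congr_left (fun x hx => by
          have hxf : (x == k) = false := beq_eq_false_iff_ne.mpr (fun hxk =>
            hrest (hxk ▸ List.mem_flatten.mpr ⟨r, hr, hx⟩))
          simp [hxf])).symm))
      · have hrest : rest.flatten.count k ≤ 1 := by omega
        simp [ih hrest]
        exact fun hmem => absurd hmem (by simpa using hb)

lemma pv_fold_map (f : String → Int) (ks : List (String × Int)) (g : String → Int)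
    (hnd : pvMyMat.flatten.Nodup) :
    ks.foldl (fun mat kv => pvMatLoop kv.1 (f kv.1) pvMyMat mat) (pvMyMat.map (fun r => r.map g))
      = pvMyMat.map (fun r => r.map (fun s => if ks.any (fun kv => s == kv.1) then f s else g s)) := by
  induction ks generalizing g with
  | nil => simp
  | cons kv rest ih =>
      have hcnt : pvMyMat.flatten.count kv.1 ≤ 1 :=
        List.nodup_iff_count_le_one.mp hnd kv.1
      simp only [List.foldl_cons, pvMatLoop_map kv.1 (f kv.1) pvMyMat g hcnt]
      rw [ih]
      congr 1
      funext r
      congr 1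
      funext s
      by_cases hs : s == kv.1
      · have hseq : s = kv.1 := eq_of_beq hs
        by_cases hr : rest.any (fun kv' => s == kv'.1)
        · simp [hseq]
        · simp [hseq]
      · by_cases hr : rest.any (fun kv' => s == kv'.1)
        · simp [hr, hs]
        · simp [hr, hs]

set_option maxRecDepth 20000 in
lemma pv_nodup_flatten : pvMyMat.flatten.Nodup := by decide

lemma pv_init_eq : List.replicate 13 (List.replicate 13 (0 : Int))
    = pvMyMat.map (fun r => r.map (fun _ => (0 : Int))) := by decide

-- B's synthesized label grid is exactly A's table
set_option maxRecDepth 20000 in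
lemma pv_grid_eq : (List.range 13).map (fun m => (List.range 13).map (fun n => pvHand m n)) = pvMyMat := by
  decide

lemma pv_alt_eq (freq : List (String × Int)) :
    create_freq_matrix_alt freq
      = pvMyMat.map (fun r => r.map (fun s => (PySem.Dict.ofList freq).getD s 0)) := by
  unfold create_freq_matrix_alt
  rw [← pv_grid_eq, List.map_map]
  simp [Function.comp, List.map_map]

-- ===== VERDICT (by name: the statement is the Claim_ definition above) =====
theorem create_freq_matrix_spec : Claim_equal_create_freq_matrix := by
  intro freq _
  unfold Spec_create_freq_matrix create_freq_matrix
  rw [pv_alt_eq, pv_init_eq,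
      pv_fold_map (fun s => (PySem.Dict.ofList freq).getD s 0) _ _ pv_nodup_flatten]
  congr 1
  funext r
  congr 1
  funext s
  by_cases hany : (PySem.Dict.ofList freq).items.any (fun kv => s == kv.1)
  · simp [hany]
  · have hnk : s ∉ (PySem.Dict.ofList freq).keys := by
      intro hmem
      apply hany
      unfold PySem.Dict.keys at hmem
      rcases List.mem_map.mp hmem with ⟨p, hp, hps⟩
      exact List.any_eq_true.mpr ⟨p, hp, by simp [hps]⟩
    have hc : (PySem.Dict.ofList freq).contains s = false := by
      by_contra hcc
      exact hnk ((PySem.Dict.contains_iff_mem_keys _ _).mp (by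
        cases hcon : (PySem.Dict.ofList freq).contains s
        · exact absurd hcon hcc
        · rfl))
    simp [hany, PySem.Dict.getD_of_not_contains (h := hc)]
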